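-- pv_equiv track=rewrite | github.com/GePix/BraapPicker | BraapPicker.py | remove_same_author_comments
-- ===== SOURCE A (Python) =====
-- def remove_same_author_comments(comments):
--     seen_authors = set()
--     filtered_comments = []
--     counter = 0
--
--     authors = [comment[1] for comment in comments]
--
--     for comment in comments:
--         author=authors[counter]
--         counter += 1
--         if author not in seen_authors:
--             filtered_comments.append(comment)
--             seen_authors.add(author)
--
--     return filtered_comments
-- ===== SOURCE B (Python) =====
-- def remove_same_author_comments(comments):
--     return [c for i, c in enumerate(comments)
--             if all(p[1] != c[1] for p in comments[:i])]
-- ===== Notes on version B (the rewrite author's own statement) =====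
-- stated objective: alternative
-- what changed: Replaces A's stateful single pass (seen set, output list, counter-indexed author lookup) with a stateless comprehension that keeps comment i iff no earlier comment in the prefix comments[:i] has the same author (nested prefix scan instead of a maintained seen set).
import Mathlib
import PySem

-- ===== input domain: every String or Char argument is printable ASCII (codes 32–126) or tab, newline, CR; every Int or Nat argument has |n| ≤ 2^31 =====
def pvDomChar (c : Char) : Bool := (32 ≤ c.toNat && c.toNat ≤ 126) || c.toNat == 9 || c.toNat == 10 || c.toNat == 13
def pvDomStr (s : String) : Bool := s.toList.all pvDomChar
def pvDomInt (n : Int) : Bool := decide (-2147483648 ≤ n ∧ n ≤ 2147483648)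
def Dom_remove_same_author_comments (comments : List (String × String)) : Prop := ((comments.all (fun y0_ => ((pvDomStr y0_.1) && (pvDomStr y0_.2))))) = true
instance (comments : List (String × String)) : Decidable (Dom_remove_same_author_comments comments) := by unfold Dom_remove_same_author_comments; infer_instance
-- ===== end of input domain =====

-- B replaces A's stateful pass (seen set, output list, counter) with a stateless
-- comprehension keeping comment i iff no earlier comment shares its author; objective: alternative.

-- ===== PORT A =====
-- A's for-loop: state (seen_authors, filtered_comments, counter); author = authors[counter].
def pvALoop (authors : List String) :
    List (String × String) → PySem.Set String → List (String × String) → Int → List (String × String)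
  | [], _, filtered, _ => filtered
  | c :: rest, seen, filtered, counter =>
    match PySem.List.pyGet? authors counter with
    | none => filtered   -- IndexError in Python; unreachable for A's own counter
    | some author =>
      if PySem.Set.contains seen author then
        pvALoop authors rest seen filtered (counter + 1)
      else
        pvALoop authors rest (PySem.Set.add seen author) (filtered ++ [c]) (counter + 1)

def remove_same_author_comments (comments : List (String × String)) : List (String × String) :=
  pvALoop (comments.map (·.2)) comments PySem.Set.empty [] 0

-- ===== PORT B =====
-- [c for i, c in enumerate(comments) if all(p[1] != c[1] for p in comments[:i])]
def remove_same_author_comments_alt (comments : List (String × String)) : List (String × String) :=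
  (PySem.List.enumerate comments).filterMap (fun ic =>
    if (PySem.List.slice comments none (some ic.1)).all (fun p => p.2 != ic.2.2) then
      some ic.2
    else none)

-- ===== PRECONDITION & SPEC =====
def Spec_remove_same_author_comments (comments : List (String × String)) (out : List (String × String)) : Prop := out = remove_same_author_comments_alt comments
instance (comments : List (String × String)) (out : List (String × String)) : Decidable (Spec_remove_same_author_comments comments out) := by unfold Spec_remove_same_author_comments; infer_instance

-- ===== CLAIM =====
def Claim_equal_remove_same_author_comments : Prop := ∀ (comments : List (String × String)), Dom_remove_same_author_comments comments → Spec_remove_same_author_comments comments (remove_same_author_comments comments)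

-- ===== LEMMAS AND PROOFS =====

-- Common reference function: process rest with processed prefix pre; keep c iff no
-- element of pre has c's author.
def pvF (pre : List (String × String)) : List (String × String) → List (String × String)
  | [] => []
  | c :: rest =>
    if pre.any (fun p => p.2 == c.2) then pvF (pre ++ [c]) rest
    else c :: pvF (pre ++ [c]) rest

lemma pvA_eq (rest : List (String × String)) :
    ∀ (pre filtered : List (String × String)) (seen : PySem.Set String),
      (∀ a, PySem.Set.contains seen a = pre.any (fun p => p.2 == a)) →
      pvALoop ((pre ++ rest).map (·.2)) rest seen filtered (pre.length : Int) =
        filtered ++ pvF pre rest := by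
  induction rest with
  | nil => intro pre filtered seen _; simp [pvALoop, pvF]
  | cons c rest ih =>
    intro pre filtered seen hinv
    have hget : PySem.List.pyGet? ((pre ++ c :: rest).map (·.2)) (pre.length : Int)
        = some c.2 := by simp
    rw [pvALoop, hget]
    dsimp only
    have hpre : ((pre ++ [c]).length : Int) = (pre.length : Int) + 1 := by simp
    have happ : (pre ++ [c]) ++ (c :: rest).tail = pre ++ c :: rest := by simp
    rw [hinv c.2]
    by_cases hmem : pre.any (fun p => p.2 == c.2) = true
    · rw [hmem]
      simp only [if_true, pvF, hmem]
      have hinv' : ∀ a, PySem.Set.contains seen a = (pre ++ [c]).any (fun p => p.2 == a) := by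
        intro a
        rw [hinv a]
        by_cases h : c.2 = a
        · subst h
          simp [hmem]
        · simp [List.any_append, h]
      have := ih (pre ++ [c]) filtered seen hinv'
      rw [hpre] at this
      simpa using this
    · simp only [hmem, Bool.false_eq_true, if_false, pvF]
      have hinv' : ∀ a, PySem.Set.contains (PySem.Set.add seen c.2) a
          = (pre ++ [c]).any (fun p => p.2 == a) := by
        intro a
        by_cases h : a = c.2
        · subst h
          simp [PySem.Set.contains_eq_listContains, List.contains_eq_mem,
            PySem.Set.mem_add, List.any_append]
        · have hm : a ∈ PySem.Set.add seen c.2 ↔ a ∈ seen := by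
            rw [PySem.Set.mem_add]; simp [h]
          have hc : PySem.Set.contains (PySem.Set.add seen c.2) a
              = PySem.Set.contains seen a := by
            simp [PySem.Set.contains_eq_listContains, List.contains_eq_mem, hm]
          have hne : (c.2 == a) = false := beq_eq_false_iff_ne.mpr (fun e => h e.symm)
          rw [hc, hinv a, List.any_append]
          simp [hne]
      have := ih (pre ++ [c]) (filtered ++ [c]) (PySem.Set.add seen c.2) hinv'
      rw [hpre] at this
      simpa using this

lemma pvAllNe (pre : List (String × String)) (a : String) :
    pre.all (fun p => p.2 != a) = ! pre.any (fun p => p.2 == a) := by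
  induction pre with
  | nil => rfl
  | cons q qre ihq => rw [List.all_cons, List.any_cons, ihq, Bool.not_or, bne]

lemma pvB_eq (rest : List (String × String)) :
    ∀ (pre : List (String × String)),
      (PySem.List.enumerate rest (pre.length : Int)).filterMap (fun ic =>
        if ((pre ++ rest).take ic.1.toNat).all (fun p => p.2 != ic.2.2) then
          some ic.2
        else none) = pvF pre rest := by
  induction rest with
  | nil => intro pre; simp [PySem.List.enumerate_nil, pvF]
  | cons c rest ih =>
    intro pre
    have hrest : (PySem.List.enumerate rest ((pre.length : Int) + 1)).filterMap (fun ic =>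
        if ((pre ++ c :: rest).take ic.1.toNat).all (fun p => p.2 != ic.2.2) then
          some ic.2
        else none) = pvF (pre ++ [c]) rest := by
      have := ih (pre ++ [c])
      rw [show (((pre ++ [c]).length : Int)) = (pre.length : Int) + 1 by simp] at this
      rw [show (pre ++ [c]) ++ rest = pre ++ c :: rest by simp] at this
      exact this
    have hhead : ((pre ++ c :: rest).take ((pre.length : Int)).toNat).all
        (fun p => p.2 != c.2) = ! pre.any (fun p => p.2 == c.2) := by
      simp only [Int.toNat_natCast, List.take_left]
      exact pvAllNe pre c.2
    rw [PySem.List.enumerate_cons, List.filterMap_cons]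
    dsimp only
    rw [hhead, hrest]
    by_cases hmem : pre.any (fun p => p.2 == c.2) = true
    · simp [pvF, hmem]
    · simp [pvF, hmem] at *

-- ===== VERDICT =====
theorem remove_same_author_comments_spec : Claim_equal_remove_same_author_comments := by
  intro comments _
  unfold Spec_remove_same_author_comments remove_same_author_comments remove_same_author_comments_alt
  have hA := pvA_eq comments [] [] PySem.Set.empty (by intro a; rfl)
  have hB := pvB_eq comments []
  simp only [List.nil_append, List.length_nil, Nat.cast_zero] at hA hB
  rw [hA]
  rw [← hB]
  apply List.filterMap_congr
  intro ic hic
  have h0 : 0 ≤ ic.1 := by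
    rcases (PySem.List.mem_enumerate_iff _ _ _).1 hic with ⟨k, hk, hp⟩
    simp [hp]
  rw [PySem.List.slice_to _ h0]
  rfl
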